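-- pv_equiv track=rewrite | github.com/mgalanme/agentic-ai-bootcamp | dia6/02_crew_kyc.py | _run
-- ===== SOURCE A (Python) =====
-- LISTAS_SANCIONES = {
--     "OFAC_SDN": ["IR", "KP", "SY", "CU"],      # países sancionados OFAC
--     "ONU":      ["IR", "KP", "LY", "SS"],       # países sancionados ONU
--     "UE":       ["IR", "KP", "SY", "RU", "BY"], # países sancionados UE
--     "FATF_BLACK": ["IR", "KP", "MM"],            # lista negra FATF
--     "FATF_GREY":  ["PA", "VG", "KY", "LR", "SY"], # lista gris FATF
-- }
--
-- def _run(pais: str, nombre: str) -> str: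
--     listas_encontradas = []
--     for lista, paises in LISTAS_SANCIONES.items():
--         if pais.upper() in paises:
--             listas_encontradas.append(lista)
--
--     if listas_encontradas:
--         return (
--             f"ALERTA SANCIONES: El país {pais} del cliente '{nombre}' "
--             f"aparece en las siguientes listas: {', '.join(listas_encontradas)}. "
--             f"Se requiere diligencia debida reforzada y posible bloqueo "
--             f"según Art.26 Ley 10/2010 y normativa OFAC."
--         )
--     return (
--         f"País {pais} del cliente '{nombre}' no aparece en listas "
--         f"de sanciones activas. Sin restricciones por este criterio."
--     )
-- ===== SOURCE B (Python) =====
-- LISTAS_SANCIONES = {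
--     "OFAC_SDN": ["IR", "KP", "SY", "CU"],
--     "ONU":      ["IR", "KP", "LY", "SS"],
--     "UE":       ["IR", "KP", "SY", "RU", "BY"],
--     "FATF_BLACK": ["IR", "KP", "MM"],
--     "FATF_GREY":  ["PA", "VG", "KY", "LR", "SY"],
-- }
--
-- # Reverse index built once at module load from the flattened (country, list) pairs,
-- # in dict order, so per-country list order equals A's append order.
-- _PARES = [(p, lista) for lista, paises in LISTAS_SANCIONES.items() for p in paises]
-- _INDICE = {}
-- for _p, _l in _PARES:
--     _INDICE.setdefault(_p, []).append(_l)
--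
-- def _run(pais: str, nombre: str) -> str:
--     hits = _INDICE.get(pais.upper())
--     if hits is None:
--         return "".join([
--             "País ", pais, " del cliente '", nombre,
--             "' no aparece en listas de sanciones activas. "
--             "Sin restricciones por este criterio.",
--         ])
--     return "".join([
--         "ALERTA SANCIONES: El país ", pais, " del cliente '", nombre,
--         "' aparece en las siguientes listas: ", ", ".join(hits),
--         ". Se requiere diligencia debida reforzada y posible bloqueo "
--         "según Art.26 Ley 10/2010 y normativa OFAC.",
--     ])
-- ===== Notes on version B (the rewrite author's own statement) =====
-- stated objective: idiomatic
-- what changed: Replaces the per-call scan over all five sanction lists by a reverse index (country -> list names) precomputed once at module load from the flattened (country, list) pairs, so _run does a single dict lookup and assembles the message from a list of pieces.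
import Mathlib
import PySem

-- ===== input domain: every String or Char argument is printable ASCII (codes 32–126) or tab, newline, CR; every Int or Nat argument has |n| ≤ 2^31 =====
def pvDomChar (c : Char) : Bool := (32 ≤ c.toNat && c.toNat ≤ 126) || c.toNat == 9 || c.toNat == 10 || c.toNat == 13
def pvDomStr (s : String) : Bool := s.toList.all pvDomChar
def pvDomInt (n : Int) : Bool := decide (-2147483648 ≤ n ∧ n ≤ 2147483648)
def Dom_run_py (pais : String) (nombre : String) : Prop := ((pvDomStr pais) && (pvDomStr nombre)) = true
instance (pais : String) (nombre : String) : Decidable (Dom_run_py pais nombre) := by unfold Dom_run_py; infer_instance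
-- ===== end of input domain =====

-- B replaces A's per-call scan of all five sanction lists by a reverse index
-- (country -> list names) built once from the flattened (country, list) pairs,
-- so _run does a single dict lookup and joins message pieces (more idiomatic).


-- ===== PORT A =====
-- LISTAS_SANCIONES as an ordered association list (dict iteration order)
def LISTAS_SANCIONES : List (String × List String) :=
  [("OFAC_SDN", ["IR", "KP", "SY", "CU"]),
   ("ONU",      ["IR", "KP", "LY", "SS"]),
   ("UE",       ["IR", "KP", "SY", "RU", "BY"]),
   ("FATF_BLACK", ["IR", "KP", "MM"]),
   ("FATF_GREY",  ["PA", "VG", "KY", "LR", "SY"])]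

def run_py (pais : String) (nombre : String) : String :=
  -- for lista, paises in LISTAS_SANCIONES.items(): if pais.upper() in paises: append
  let listas_encontradas : List String :=
    LISTAS_SANCIONES.foldl
      (fun acc p => if PySem.Str.upper pais ∈ p.2 then acc ++ [p.1] else acc) []
  if listas_encontradas ≠ [] then
    "ALERTA SANCIONES: El país " ++ pais ++ " del cliente '" ++ nombre ++
      "' aparece en las siguientes listas: " ++ PySem.Str.join ", " listas_encontradas ++
      ". Se requiere diligencia debida reforzada y posible bloqueo según Art.26 Ley 10/2010 y normativa OFAC."
  else
    "País " ++ pais ++ " del cliente '" ++ nombre ++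
      "' no aparece en listas de sanciones activas. Sin restricciones por este criterio."

-- ===== PORT B =====
-- _PARES = [(p, lista) for lista, paises in LISTAS_SANCIONES.items() for p in paises]
def PARES : List (String × String) :=
  LISTAS_SANCIONES.flatMap (fun q => q.2.map (fun p => (p, q.1)))

-- for _p, _l in _PARES: _INDICE.setdefault(_p, []).append(_l)
def INDICE : PySem.Dict String (List String) :=
  PARES.foldl (fun d pr => d.modify pr.1 [] (· ++ [pr.2])) PySem.Dict.empty

def run_py_alt (pais : String) (nombre : String) : String :=
  match INDICE.get? (PySem.Str.upper pais) with
  | none =>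
      PySem.Str.join ""
        ["País ", pais, " del cliente '", nombre,
         "' no aparece en listas de sanciones activas. Sin restricciones por este criterio."]
  | some hits =>
      PySem.Str.join ""
        ["ALERTA SANCIONES: El país ", pais, " del cliente '", nombre,
         "' aparece en las siguientes listas: ", PySem.Str.join ", " hits,
         ". Se requiere diligencia debida reforzada y posible bloqueo según Art.26 Ley 10/2010 y normativa OFAC."]

-- ===== PRECONDITION & SPEC =====
def Spec_run_py (pais : String) (nombre : String) (out : String) : Prop := out = run_py_alt pais nombre
instance (pais : String) (nombre : String) (out : String) : Decidable (Spec_run_py pais nombre out) := by unfold Spec_run_py; infer_instance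

-- ===== CLAIM =====
def Claim_equal_run_py : Prop := ∀ (pais : String) (nombre : String), Dom_run_py pais nombre → Spec_run_py pais nombre (run_py pais nombre)

-- ===== LEMMAS AND PROOFS =====

-- A's scan result, as a function of the looked-up key.
def scanA (u : String) : List String :=
  LISTAS_SANCIONES.foldl (fun acc p => if u ∈ p.2 then acc ++ [p.1] else acc) []

-- B's indexed lookup agrees with A's scan: none exactly when the scan is empty,
-- some of exactly the scanned list otherwise.
theorem get?_eq_scan (u : String) :
    INDICE.get? u = if scanA u = [] then none else some (scanA u) := by
  by_cases h1 : u = "IR"; · subst h1; decide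
  by_cases h2 : u = "KP"; · subst h2; decide
  by_cases h3 : u = "SY"; · subst h3; decide
  by_cases h4 : u = "CU"; · subst h4; decide
  by_cases h5 : u = "LY"; · subst h5; decide
  by_cases h6 : u = "SS"; · subst h6; decide
  by_cases h7 : u = "RU"; · subst h7; decide
  by_cases h8 : u = "BY"; · subst h8; decide
  by_cases h9 : u = "MM"; · subst h9; decide
  by_cases h10 : u = "PA"; · subst h10; decide
  by_cases h11 : u = "VG"; · subst h11; decide
  by_cases h12 : u = "KY"; · subst h12; decide
  by_cases h13 : u = "LR"; · subst h13; decide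
  -- u matches no sanctioned country: scan is [] and the index has no entry
  have hI : INDICE = PySem.Dict.mk
      [("IR", ["OFAC_SDN", "ONU", "UE", "FATF_BLACK"]),
       ("KP", ["OFAC_SDN", "ONU", "UE", "FATF_BLACK"]),
       ("SY", ["OFAC_SDN", "UE", "FATF_GREY"]),
       ("CU", ["OFAC_SDN"]),
       ("LY", ["ONU"]),
       ("SS", ["ONU"]),
       ("RU", ["UE"]),
       ("BY", ["UE"]),
       ("MM", ["FATF_BLACK"]),
       ("PA", ["FATF_GREY"]),
       ("VG", ["FATF_GREY"]),
       ("KY", ["FATF_GREY"]),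
       ("LR", ["FATF_GREY"])] := by decide
  rw [hI]
  simp [scanA, LISTAS_SANCIONES, PySem.Dict.get?,
        h1, h2, h3, h4, h5, h6, h7, h8, h9, h10, h11, h12, h13,
        Ne.symm h1, Ne.symm h2, Ne.symm h3, Ne.symm h4, Ne.symm h5, Ne.symm h6,
        Ne.symm h7, Ne.symm h8, Ne.symm h9, Ne.symm h10, Ne.symm h11, Ne.symm h12,
        Ne.symm h13]

-- "".join of the five no-hit pieces is the concatenation A writes.
theorem join_clean (p n : String) :
    PySem.Str.join ""
      ["País ", p, " del cliente '", n,
       "' no aparece en listas de sanciones activas. Sin restricciones por este criterio."]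
    = "País " ++ p ++ " del cliente '" ++ n ++
      "' no aparece en listas de sanciones activas. Sin restricciones por este criterio." := by
  apply String.toList_injective
  simp [PySem.Str.toList_join, PySem.Chars.join, List.intercalate]

-- "".join of the seven alert pieces is the concatenation A writes.
theorem join_alert (p n j : String) :
    PySem.Str.join ""
      ["ALERTA SANCIONES: El país ", p, " del cliente '", n,
       "' aparece en las siguientes listas: ", j,
       ". Se requiere diligencia debida reforzada y posible bloqueo según Art.26 Ley 10/2010 y normativa OFAC."]
    = "ALERTA SANCIONES: El país " ++ p ++ " del cliente '" ++ n ++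
      "' aparece en las siguientes listas: " ++ j ++
      ". Se requiere diligencia debida reforzada y posible bloqueo según Art.26 Ley 10/2010 y normativa OFAC." := by
  apply String.toList_injective
  simp [PySem.Str.toList_join, PySem.Chars.join, List.intercalate]

-- ===== VERDICT =====
theorem run_py_spec : Claim_equal_run_py := by
  intro pais nombre _
  unfold Spec_run_py run_py run_py_alt
  rw [show (LISTAS_SANCIONES.foldl
      (fun acc p => if PySem.Str.upper pais ∈ p.2 then acc ++ [p.1] else acc) [])
      = scanA (PySem.Str.upper pais) from rfl,
     get?_eq_scan (PySem.Str.upper pais)]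
  by_cases h : scanA (PySem.Str.upper pais) = []
  · simp [h, join_clean]
  · simp [h, join_alert]
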